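-- pv_equiv track=rewrite | github.com/GeorgianBadita/University | Semester1/Fundamentals of Programming/seminarii/seminar13/sem13_div_conq.py | sum_elem_div3_conq
-- ===== SOURCE A (Python) =====
-- def sum_elem_div3_conq(lst, st, dr):
--     """
--     Calculeaza suma elementelor de pe pozitii divizibile cu 3
--     :param lst: lista
--     :return:
--     """
--     if st == dr and st % 3 == 0:
--         return lst[st]
--     elif st == dr:
--         return 0
--     elif dr < st:
--         return 0
--
--     m = (st + dr)//2
--     return sum_elem_div3_conq(lst, st, m) + sum_elem_div3_conq(lst, m+1, dr)
-- ===== SOURCE B (Python) =====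
-- def sum_elem_div3_conq(lst, st, dr):
--     return sum(lst[i] for i in range(st, dr + 1) if i % 3 == 0)
-- ===== Notes on version B (the rewrite author's own statement) =====
-- stated objective: simpler
-- what changed: Replaces the divide-and-conquer interval recursion by a single flat generator-sum over range(st, dr+1) keeping only indices divisible by 3.
import Mathlib
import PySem

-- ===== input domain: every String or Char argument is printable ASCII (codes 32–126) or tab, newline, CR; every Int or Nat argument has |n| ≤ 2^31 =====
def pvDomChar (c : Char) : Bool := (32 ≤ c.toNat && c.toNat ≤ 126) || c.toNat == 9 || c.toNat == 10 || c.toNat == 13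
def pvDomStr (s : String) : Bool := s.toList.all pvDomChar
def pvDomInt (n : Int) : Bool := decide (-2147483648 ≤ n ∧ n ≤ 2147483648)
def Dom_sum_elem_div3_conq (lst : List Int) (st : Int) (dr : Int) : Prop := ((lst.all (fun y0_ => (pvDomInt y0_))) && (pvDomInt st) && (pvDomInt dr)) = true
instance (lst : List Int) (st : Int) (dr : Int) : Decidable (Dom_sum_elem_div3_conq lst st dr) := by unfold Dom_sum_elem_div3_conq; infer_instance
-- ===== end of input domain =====

-- B replaces A's divide-and-conquer recursion by one flat filtered pass over the index range (simpler).

-- ===== PORT A =====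
-- literal transliteration of A's interval recursion; lst[st] is pyGetD (in range by Pre_)
def sum_elem_div3_conq (lst : List Int) (st : Int) (dr : Int) : Int :=
  if st = dr ∧ PySem.Int.mod st 3 = 0 then PySem.List.pyGetD lst st 0
  else if st = dr then 0
  else if dr < st then 0
  else
    let m := PySem.Int.floordiv (st + dr) 2
    sum_elem_div3_conq lst st m + sum_elem_div3_conq lst (m + 1) dr
termination_by (dr - st).toNat
decreasing_by
  · have h2 : ¬ st = dr := by assumption
    have h := PySem.Int.floordiv_two_mid_bounds (lo := st) (hi := dr) (by omega)
    have hlt : PySem.Int.floordiv (st + dr) 2 < dr := by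
      rw [PySem.Int.floordiv_lt_iff_lt_mul (by omega)]; omega
    omega
  · have h2 : ¬ st = dr := by assumption
    have h := PySem.Int.floordiv_two_mid_bounds (lo := st) (hi := dr) (by omega)
    omega

-- ===== PORT B =====
-- 'sum(lst[i] for i in range(st, dr+1) if i % 3 == 0)'
def sum_elem_div3_conq_alt (lst : List Int) (st : Int) (dr : Int) : Int :=
  (PySem.List.pyRange st (dr + 1) 1).foldl
    (fun acc i => if PySem.Int.mod i 3 = 0 then acc + PySem.List.pyGetD lst i 0 else acc) 0

-- ===== PRECONDITION & SPEC =====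
-- Pre_ excludes exactly the inputs where Python A raises IndexError: some index i in [st, dr]
-- with i % 3 == 0 lying outside Python's valid index range for lst (B raises there too);
-- stated in closed form: no multiple of 3 lies in [st, dr] below -len(lst) or at/above len(lst).
def Pre_sum_elem_div3_conq (lst : List Int) (st : Int) (dr : Int) : Prop :=
  ¬ ((st ≤ min dr (-(lst.length : Int) - 1) ∧
        st ≤ min dr (-(lst.length : Int) - 1) - (min dr (-(lst.length : Int) - 1)) % 3) ∨
     (max st (lst.length : Int) ≤ dr ∧ max st (lst.length : Int) ≤ dr - dr % 3))
instance (lst : List Int) (st : Int) (dr : Int) : Decidable (Pre_sum_elem_div3_conq lst st dr) := by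
  unfold Pre_sum_elem_div3_conq; infer_instance
def pvWitness_sum_elem_div3_conq : List Int × Int × Int := ([1, 2, 3, 4, 5, 6, 7], 1, 6)

def Spec_sum_elem_div3_conq (lst : List Int) (st : Int) (dr : Int) (out : Int) : Prop := out = sum_elem_div3_conq_alt lst st dr
instance (lst : List Int) (st : Int) (dr : Int) (out : Int) : Decidable (Spec_sum_elem_div3_conq lst st dr out) := by unfold Spec_sum_elem_div3_conq; infer_instance

-- ===== CLAIM (what is proved, stated in full; the proofs are below) =====
def Claim_equal_sum_elem_div3_conq : Prop := ∀ (lst : List Int) (st : Int) (dr : Int), Dom_sum_elem_div3_conq lst st dr → Pre_sum_elem_div3_conq lst st dr → Spec_sum_elem_div3_conq lst st dr (sum_elem_div3_conq lst st dr)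

-- ===== LEMMAS AND PROOFS =====

-- B as a sum over the filtered index range
theorem alt_eq_sum (lst : List Int) (st dr : Int) :
    sum_elem_div3_conq_alt lst st dr =
      (((PySem.List.pyRange st (dr + 1) 1).filter
          (fun i => decide (PySem.Int.mod i 3 = 0))).map
        (fun i => PySem.List.pyGetD lst i 0)).sum := by
  unfold sum_elem_div3_conq_alt
  have h := PySem.List.foldl_add (l := (PySem.List.pyRange st (dr + 1) 1))
    (g := fun i => if PySem.Int.mod i 3 = 0 then PySem.List.pyGetD lst i 0 else 0) (a := 0)
  rw [show (fun acc i => if PySem.Int.mod i 3 = 0 then acc + PySem.List.pyGetD lst i 0 else acc)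
        = (fun acc i => acc + (if PySem.Int.mod i 3 = 0 then PySem.List.pyGetD lst i 0 else 0)) by
      funext acc i; split <;> simp]
  rw [h, zero_add]
  induction (PySem.List.pyRange st (dr + 1) 1) with
  | nil => simp
  | cons x xs ih =>
    by_cases hx : PySem.Int.mod x 3 = 0
    · rw [List.map_cons, List.sum_cons, if_pos hx, ih,
        List.filter_cons_of_pos (by simpa using hx), List.map_cons, List.sum_cons]
    · rw [List.map_cons, List.sum_cons, if_neg hx, ih,
        List.filter_cons_of_neg (by simpa using hx), zero_add]

theorem AB_eq (lst : List Int) (st dr : Int) :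
    sum_elem_div3_conq lst st dr = sum_elem_div3_conq_alt lst st dr := by
  rw [alt_eq_sum]
  induction hn : (dr - st).toNat using Nat.strong_induction_on generalizing st dr with
  | _ n ih =>
  rw [sum_elem_div3_conq]
  by_cases h1 : st = dr ∧ PySem.Int.mod st 3 = 0
  · rw [if_pos h1, h1.1,
      PySem.List.pyRange_one_cons (by omega), PySem.List.pyRange_one_eq_nil (by omega),
      List.filter_cons_of_pos (by rw [← h1.1]; simpa using h1.2), List.filter_nil, List.map_cons,
      List.map_nil, List.sum_cons, List.sum_nil, add_zero]
  · by_cases h2 : st = dr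
    · have h3 : ¬ PySem.Int.mod st 3 = 0 := fun hc => h1 ⟨h2, hc⟩
      rw [if_neg h1, if_pos h2, ← h2,
        PySem.List.pyRange_one_cons (by omega), PySem.List.pyRange_one_eq_nil (by omega),
        List.filter_cons_of_neg (by simpa using h3), List.filter_nil, List.map_nil, List.sum_nil]
    · by_cases h4 : dr < st
      · rw [if_neg h1, if_neg h2, if_pos h4,
          PySem.List.pyRange_one_eq_nil (by omega), List.filter_nil, List.map_nil, List.sum_nil]
      · rw [if_neg h1, if_neg h2, if_neg h4]
        have hm := PySem.Int.floordiv_two_mid_bounds (lo := st) (hi := dr) (by omega)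
        have hmlt : PySem.Int.floordiv (st + dr) 2 < dr := by
          rw [PySem.Int.floordiv_lt_iff_lt_mul (by omega)]; omega
        set m := PySem.Int.floordiv (st + dr) 2 with hmdef
        dsimp only
        rw [ih (m - st).toNat (by omega) st m rfl,
            ih (dr - (m + 1)).toNat (by omega) (m + 1) dr rfl]
        rw [PySem.List.pyRange_one_append st (m + 1) (dr + 1) (by omega) (by omega),
            List.filter_append, List.map_append, List.sum_append]

-- ===== VERDICT (by name: the statement is the Claim_ definition above) =====
theorem sum_elem_div3_conq_spec : Claim_equal_sum_elem_div3_conq := by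
  intro lst st dr _ _
  unfold Spec_sum_elem_div3_conq
  exact AB_eq lst st dr
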